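-- pv_equiv track=rewrite | github.com/ischeinkman/osg-test-rsync | conlog_parse.py | slothosts_to_eviction_counts
-- ===== SOURCE A (Python) =====
-- def slothosts_to_eviction_counts(by_proc_data):
--     retval = {}
--     for cur_proc in by_proc_data:
--         data = by_proc_data[cur_proc]
--         fail = 'Evicted' in data
--         for curslt in data['JOB_GLIDEIN_SiteWMS_Slot']:
--             if not curslt in retval:
--                 retval[curslt] = [0, 0]
--             if not fail:
--                 retval[curslt][0] += 1
--             else:
--                 retval[curslt][1] += 1
--     return retval
-- ===== SOURCE B (Python) =====
-- def slothosts_to_eviction_counts(by_proc_data):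
--     # Stage 1: flatten into a list of (slot, evicted?) events.
--     events = []
--     for cur_proc in by_proc_data:
--         data = by_proc_data[cur_proc]
--         fail = 'Evicted' in data
--         for slot in data['JOB_GLIDEIN_SiteWMS_Slot']:
--             events.append((slot, fail))
--     # Stage 2: for each slot in first-occurrence order, count its events by scanning.
--     retval = {}
--     for slot, _fail in events:
--         if slot not in retval:
--             retval[slot] = [events.count((slot, False)), events.count((slot, True))]
--     return retval
-- ===== Notes on version B (the rewrite author's own statement) =====
-- stated objective: alternative
-- what changed: B first flattens the input into a list of (slot, evicted) events and then, for each distinct slot in first-occurrence order, obtains its success/eviction counts by whole-list counting scans (events.count), instead of A's single pass that increments a mutable [succ, evict] pair per event.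
import Mathlib
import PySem

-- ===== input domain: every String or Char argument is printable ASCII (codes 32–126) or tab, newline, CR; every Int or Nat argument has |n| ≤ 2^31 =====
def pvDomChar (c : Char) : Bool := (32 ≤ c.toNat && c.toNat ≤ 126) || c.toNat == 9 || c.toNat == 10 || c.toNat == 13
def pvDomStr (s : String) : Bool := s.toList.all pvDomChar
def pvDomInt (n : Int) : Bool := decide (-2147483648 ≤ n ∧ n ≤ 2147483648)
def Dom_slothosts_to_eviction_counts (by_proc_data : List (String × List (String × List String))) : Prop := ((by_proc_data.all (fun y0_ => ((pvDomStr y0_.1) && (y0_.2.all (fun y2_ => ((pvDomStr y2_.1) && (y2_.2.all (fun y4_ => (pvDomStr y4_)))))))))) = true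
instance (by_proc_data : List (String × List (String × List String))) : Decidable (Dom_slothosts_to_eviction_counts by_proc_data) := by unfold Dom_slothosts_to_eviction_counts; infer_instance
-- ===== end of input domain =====

-- B flattens the input into one (slot, evicted) event list and then, for each distinct slot in
-- first-occurrence order, derives its [success, eviction] counts by whole-list counting scans,
-- instead of A's single pass incrementing a mutable [succ, evict] pair per event.

-- ===== PORT A =====
-- Python `v[i] += 1` on the two-element count list (the index is always in range here)
def pyIncAt (v : List Int) (i : Nat) : List Int := v.set i (v.getD i 0 + 1)

def slothosts_to_eviction_counts (by_proc_data : List (String × List (String × List String))) : List (String × List Int) :=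
  (by_proc_data.foldl
    (fun (retval : PySem.Dict String (List Int)) cur_proc =>
      let data := PySem.Dict.ofList cur_proc.2
      let fail := data.contains "Evicted"
      -- data['JOB_GLIDEIN_SiteWMS_Slot'] raises KeyError when the key is absent: excluded by Pre_
      (data.getD "JOB_GLIDEIN_SiteWMS_Slot" []).foldl
        (fun r curslt =>
          let r := if r.contains curslt then r else r.insert curslt [0, 0]
          if !fail then r.insert curslt (pyIncAt (r.getD curslt [0, 0]) 0)
          else r.insert curslt (pyIncAt (r.getD curslt [0, 0]) 1))
        retval)
    PySem.Dict.empty).items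

-- ===== PORT B =====
def slothosts_to_eviction_counts_alt (by_proc_data : List (String × List (String × List String))) : List (String × List Int) :=
  let events : List (String × Bool) := by_proc_data.foldl
    (fun ev cur_proc =>
      let data := PySem.Dict.ofList cur_proc.2
      let fail := data.contains "Evicted"
      -- data['JOB_GLIDEIN_SiteWMS_Slot'] raises KeyError when the key is absent: excluded by Pre_
      (data.getD "JOB_GLIDEIN_SiteWMS_Slot" []).foldl (fun ev slot => ev ++ [(slot, fail)]) ev)
    []
  (events.foldl
    (fun (retval : PySem.Dict String (List Int)) ev =>
      if retval.contains ev.1 then retval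
      else retval.insert ev.1 [(events.count (ev.1, false) : Int), (events.count (ev.1, true) : Int)])
    PySem.Dict.empty).items

-- ===== PRECONDITION & SPEC =====
-- Pre_ excludes exactly the inputs where some process record lacks the 'JOB_GLIDEIN_SiteWMS_Slot'
-- key, on which the Python A raises KeyError (and B raises there too).
def Pre_slothosts_to_eviction_counts (by_proc_data : List (String × List (String × List String))) : Prop :=
  ∀ pr ∈ by_proc_data, "JOB_GLIDEIN_SiteWMS_Slot" ∈ pr.2.map Prod.fst
instance (by_proc_data : List (String × List (String × List String))) : Decidable (Pre_slothosts_to_eviction_counts by_proc_data) := by unfold Pre_slothosts_to_eviction_counts; infer_instance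
def pvWitness_slothosts_to_eviction_counts : (List (String × List (String × List String))) :=
  [("p1", [("JOB_GLIDEIN_SiteWMS_Slot", ["slot1", "slot2"])]),
   ("p2", [("JOB_GLIDEIN_SiteWMS_Slot", ["slot1"]), ("Evicted", [])])]

def Spec_slothosts_to_eviction_counts (by_proc_data : List (String × List (String × List String))) (out : List (String × List Int)) : Prop := out = slothosts_to_eviction_counts_alt by_proc_data
instance (by_proc_data : List (String × List (String × List String))) (out : List (String × List Int)) : Decidable (Spec_slothosts_to_eviction_counts by_proc_data out) := by unfold Spec_slothosts_to_eviction_counts; infer_instance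

-- ===== CLAIM (what is proved, stated in full; the proofs are below) =====
def Claim_equal_slothosts_to_eviction_counts : Prop := ∀ (by_proc_data : List (String × List (String × List String))), Dom_slothosts_to_eviction_counts by_proc_data → Pre_slothosts_to_eviction_counts by_proc_data → Spec_slothosts_to_eviction_counts by_proc_data (slothosts_to_eviction_counts by_proc_data)

-- ===== LEMMAS AND PROOFS =====

-- proof-only helpers: both ports replayed over the flattened (slot, fail) event list
def pvSlots (pr : String × List (String × List String)) : List String :=
  (PySem.Dict.ofList pr.2).getD "JOB_GLIDEIN_SiteWMS_Slot" []

def pvFail (pr : String × List (String × List String)) : Bool :=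
  (PySem.Dict.ofList pr.2).contains "Evicted"

def pvEvents (bpd : List (String × List (String × List String))) : List (String × Bool) :=
  bpd.flatMap (fun pr => (pvSlots pr).map (fun s => (s, pvFail pr)))

def pvStepA (r : PySem.Dict String (List Int)) (ev : String × Bool) : PySem.Dict String (List Int) :=
  let r := if r.contains ev.1 then r else r.insert ev.1 [0, 0]
  if !ev.2 then r.insert ev.1 (pyIncAt (r.getD ev.1 [0, 0]) 0)
  else r.insert ev.1 (pyIncAt (r.getD ev.1 [0, 0]) 1)

-- first-occurrence order of the keys of L not already in `seen`
def pvFO (seen : List String) : List String → List String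
  | [] => []
  | k :: r => if k ∈ seen then pvFO seen r else k :: pvFO (k :: seen) r

def pvCF (E : List (String × Bool)) (k : String) : Int := (E.count (k, false) : Int)
def pvCT (E : List (String × Bool)) (k : String) : Int := (E.count (k, true) : Int)

-- the common description of both results: keys in first-occurrence order, values the two counts
def pvSpec (P : List (String × Bool)) : List (String × List Int) :=
  (pvFO [] (P.map Prod.fst)).map (fun k => (k, [pvCF P k, pvCT P k]))

lemma mem_pvFO (k : String) : ∀ (L seen : List String), k ∈ pvFO seen L ↔ k ∈ L ∧ k ∉ seen := by
  intro L
  induction L with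
  | nil => intro seen; simp [pvFO]
  | cons x r ih =>
    intro seen
    by_cases hx : x ∈ seen
    · rw [pvFO, if_pos hx, ih]
      simp only [List.mem_cons]
      constructor
      · rintro ⟨h1, h2⟩; exact ⟨Or.inr h1, h2⟩
      · rintro ⟨rfl | h1, h2⟩
        · exact absurd hx h2
        · exact ⟨h1, h2⟩
    · rw [pvFO, if_neg hx]
      simp only [List.mem_cons, ih]
      constructor
      · rintro (rfl | ⟨h1, h2⟩)
        · exact ⟨Or.inl rfl, hx⟩
        · exact ⟨Or.inr h1, fun hk => h2 (Or.inr hk)⟩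
      · rintro ⟨rfl | h1, h2⟩
        · exact Or.inl rfl
        · by_cases hks : k = x
          · exact Or.inl hks
          · exact Or.inr ⟨h1, fun hk => hk.elim hks h2⟩

lemma nodup_pvFO : ∀ (L seen : List String), (pvFO seen L).Nodup := by
  intro L
  induction L with
  | nil => intro seen; simp [pvFO]
  | cons x r ih =>
    intro seen
    by_cases hx : x ∈ seen
    · simpa [pvFO, if_pos hx] using ih seen
    · simp only [pvFO, if_neg hx, List.nodup_cons]
      refine ⟨fun hm => ?_, ih _⟩
      exact ((mem_pvFO x r (x :: seen)).mp hm).2 (List.mem_cons_self)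

lemma pvFO_congr : ∀ (L s1 s2 : List String), (∀ x, x ∈ s1 ↔ x ∈ s2) → pvFO s1 L = pvFO s2 L := by
  intro L
  induction L with
  | nil => intro _ _ _; rfl
  | cons x r ih =>
    intro s1 s2 h
    by_cases hx : x ∈ s1
    · rw [pvFO, pvFO, if_pos hx, if_pos ((h x).mp hx), ih _ _ h]
    · rw [pvFO, pvFO, if_neg hx, if_neg (fun hc => hx ((h x).mpr hc))]
      congr 1
      apply ih
      intro y; simp [List.mem_cons, h y]

lemma pvFO_append_single : ∀ (L seen : List String) (s : String),
    pvFO seen (L ++ [s]) = pvFO seen L ++ (if s ∈ seen ∨ s ∈ L then [] else [s]) := by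
  intro L
  induction L with
  | nil =>
    intro seen s
    by_cases hs : s ∈ seen <;> simp [pvFO, hs]
  | cons x r ih =>
    intro seen s
    rw [List.cons_append, pvFO, pvFO]
    by_cases hx : x ∈ seen
    · rw [if_pos hx, if_pos hx, ih]
      congr 1
      simp only [List.mem_cons]
      have hiff : (s ∈ seen ∨ s = x ∨ s ∈ r) ↔ (s ∈ seen ∨ s ∈ r) := by
        constructor
        · rintro (h | rfl | h)
          · exact Or.inl h
          · exact Or.inl hx
          · exact Or.inr h
        · tauto
      simp only [hiff]
    · rw [if_neg hx, if_neg hx, ih, List.cons_append]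
      congr 1
      congr 1
      simp only [List.mem_cons]
      split_ifs with h1 h2 <;> first | rfl | tauto

lemma pvCF_append_single (P : List (String × Bool)) (s : String) (f : Bool) (k : String) :
    pvCF (P ++ [(s, f)]) k = pvCF P k + (if k = s ∧ f = false then 1 else 0) := by
  simp only [pvCF, List.count_append, Nat.cast_add]
  congr 1
  by_cases h : k = s ∧ f = false
  · obtain ⟨rfl, rfl⟩ := h; simp
  · rw [if_neg h]
    simp only [List.count_cons, List.count_nil]
    simp
    rintro rfl
    cases f with
    | false => exact absurd ⟨rfl, rfl⟩ h
    | true => rfl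

lemma pvCT_append_single (P : List (String × Bool)) (s : String) (f : Bool) (k : String) :
    pvCT (P ++ [(s, f)]) k = pvCT P k + (if k = s ∧ f = true then 1 else 0) := by
  simp only [pvCT, List.count_append, Nat.cast_add]
  congr 1
  by_cases h : k = s ∧ f = true
  · obtain ⟨rfl, rfl⟩ := h; simp
  · rw [if_neg h]
    simp only [List.count_cons, List.count_nil]
    simp
    rintro rfl
    cases f with
    | false => rfl
    | true => exact absurd ⟨rfl, rfl⟩ h

lemma pvCF_zero_of_not_mem (P : List (String × Bool)) (s : String) (h : s ∉ P.map Prod.fst) :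
    pvCF P s = 0 := by
  simp only [pvCF, Int.natCast_eq_zero]
  rw [List.count_eq_zero]
  intro hc
  exact h (by simpa using List.mem_map_of_mem (f := Prod.fst) hc)

lemma pvCT_zero_of_not_mem (P : List (String × Bool)) (s : String) (h : s ∉ P.map Prod.fst) :
    pvCT P s = 0 := by
  simp only [pvCT, Int.natCast_eq_zero]
  rw [List.count_eq_zero]
  intro hc
  exact h (by simpa using List.mem_map_of_mem (f := Prod.fst) hc)

-- A's whole result, replayed: the events fold of A's step from a dict realizing pvSpec P
lemma pv_A_events (bpd : List (String × List (String × List String))) :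
    slothosts_to_eviction_counts bpd = ((pvEvents bpd).foldl pvStepA PySem.Dict.empty).items := by
  unfold slothosts_to_eviction_counts pvEvents
  rw [List.foldl_flatMap]
  simp only [List.foldl_map]
  rfl

-- B's event list is the flattened pvEvents
lemma pv_B_events (bpd : List (String × List (String × List String))) :
    bpd.foldl
      (fun ev cur_proc =>
        let data := PySem.Dict.ofList cur_proc.2
        let fail := data.contains "Evicted"
        (data.getD "JOB_GLIDEIN_SiteWMS_Slot" []).foldl (fun ev slot => ev ++ [(slot, fail)]) ev)
      [] = pvEvents bpd := by
  unfold pvEvents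
  have h := PySem.List.foldl_append_eq_flatMap
    (l := bpd) (g := fun pr => (pvSlots pr).map (fun s => (s, pvFail pr)))
    (acc := ([] : List (String × Bool)))
  rw [List.nil_append] at h
  rw [← h]
  apply PySem.List.foldl_congr_mem
  intro acc pr _
  simp only [PySem.List.foldl_append_singleton_eq_map]
  rfl

lemma pv_A_step (P : List (String × Bool)) (s : String) (f : Bool)
    (D : PySem.Dict String (List Int)) (hD : D.items = pvSpec P) :
    (pvStepA D (s, f)).items = pvSpec (P ++ [(s, f)]) := by
  have hkeys : D.keys = pvFO [] (P.map Prod.fst) := by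
    simp only [PySem.Dict.keys, hD, pvSpec, List.map_map]
    have : ((fun x => x.1) ∘ fun k => (k, [pvCF P k, pvCT P k])) = id := rfl
    rw [this, List.map_id]
  have hnd : D.keys.Nodup := by rw [hkeys]; exact nodup_pvFO _ _
  have hmapfst : (P ++ [(s, f)]).map Prod.fst = P.map Prod.fst ++ [s] := by simp
  by_cases hs : s ∈ P.map Prod.fst
  · -- slot already seen: in-place update of its entry
    have hsfo : s ∈ pvFO [] (P.map Prod.fst) :=
      (mem_pvFO s _ []).mpr ⟨hs, by simp⟩
    have hc : D.contains s = true := by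
      rw [PySem.Dict.contains_eq_decide_mem_keys, hkeys]; simpa using hsfo
    have hmem : (s, [pvCF P s, pvCT P s]) ∈ D.items := by
      rw [hD, pvSpec]
      exact List.mem_map_of_mem hsfo
    have hg : D.getD s [0, 0] = [pvCF P s, pvCT P s] :=
      PySem.Dict.getD_of_mem_items D hmem hnd [0, 0]
    have hfo' : pvFO [] ((P ++ [(s, f)]).map Prod.fst) = pvFO [] (P.map Prod.fst) := by
      rw [hmapfst, pvFO_append_single]
      simp [hs]
    have hmain := fun (v : List Int) => PySem.Dict.items_insert_of_contains D v hc
    cases f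
    · simp only [pvStepA, hc, if_true, Bool.not_false, hg, pyIncAt]
      rw [hmain, hD, pvSpec, pvSpec, hfo', List.map_map]
      apply List.map_congr_left
      intro k _
      by_cases hks : k = s
      · subst hks
        simp [pvCF_append_single, pvCT_append_single]
      · simp [Function.comp, hks, pvCF_append_single, pvCT_append_single]
    · simp only [pvStepA, hc, if_true, Bool.not_true, hg, Bool.false_eq_true, if_false,
        pyIncAt]
      rw [hmain, hD, pvSpec, pvSpec, hfo', List.map_map]
      apply List.map_congr_left
      intro k _
      by_cases hks : k = s
      · subst hks
        simp [pvCF_append_single, pvCT_append_single]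
      · simp [Function.comp, hks, pvCF_append_single, pvCT_append_single]
  · -- fresh slot: a new entry is appended
    have hc : D.contains s = false := by
      rw [PySem.Dict.contains_eq_decide_mem_keys, hkeys]
      simp only [decide_eq_false_iff_not]
      intro hm
      exact hs ((mem_pvFO s _ []).mp hm).1
    have hfo' : pvFO [] ((P ++ [(s, f)]).map Prod.fst) = pvFO [] (P.map Prod.fst) ++ [s] := by
      rw [hmapfst, pvFO_append_single]
      simp [hs]
    have hF := pvCF_zero_of_not_mem P s hs
    have hT := pvCT_zero_of_not_mem P s hs
    have step2 : ∀ v, ((D.insert s [0, 0]).insert s v).items = D.items ++ [(s, v)] := by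
      intro v
      rw [PySem.Dict.insert_insert_self, PySem.Dict.items_insert_of_not_contains (h := hc)]
    cases f
    · simp only [pvStepA, hc, Bool.false_eq_true, if_false, Bool.not_false, if_true,
        PySem.Dict.getD_insert_self, pyIncAt]
      rw [step2, hD, pvSpec, pvSpec, hfo', List.map_append]
      congr 1
      · apply List.map_congr_left
        intro k hk
        have hks : k ≠ s := by
          intro h; subst h
          exact hs ((mem_pvFO k _ []).mp hk).1
        simp [pvCF_append_single, pvCT_append_single, hks]
      · simp [pvCF_append_single, pvCT_append_single, hF, hT]
    · simp only [pvStepA, hc, Bool.false_eq_true, if_false, Bool.not_true,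
        PySem.Dict.getD_insert_self, pyIncAt]
      rw [step2, hD, pvSpec, pvSpec, hfo', List.map_append]
      congr 1
      · apply List.map_congr_left
        intro k hk
        have hks : k ≠ s := by
          intro h; subst h
          exact hs ((mem_pvFO k _ []).mp hk).1
        simp [pvCF_append_single, pvCT_append_single, hks]
      · simp [pvCF_append_single, pvCT_append_single, hF, hT]

lemma pv_A_inv : ∀ (rest P : List (String × Bool)) (D : PySem.Dict String (List Int)),
    D.items = pvSpec P → (rest.foldl pvStepA D).items = pvSpec (P ++ rest) := by
  intro rest
  induction rest with
  | nil => intro P D hD; simpa using hD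
  | cons ev r ih =>
    intro P D hD
    obtain ⟨s, f⟩ := ev
    have h1 : (pvStepA D (s, f)).items = pvSpec (P ++ [(s, f)]) := pv_A_step P s f D hD
    have := ih (P ++ [(s, f)]) _ h1
    simpa [List.append_assoc] using this

-- B's second pass: only fresh keys are inserted, so the items list just grows,
-- with keys in first-occurrence order among those not already present
lemma pv_B_inv (g : String → List Int) :
    ∀ (rest : List (String × Bool)) (D : PySem.Dict String (List Int)),
    (rest.foldl
      (fun retval ev => if retval.contains ev.1 then retval else retval.insert ev.1 (g ev.1))
      D).items
      = D.items ++ (pvFO D.keys (rest.map Prod.fst)).map (fun k => (k, g k)) := by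
  intro rest
  induction rest with
  | nil => intro D; simp [pvFO]
  | cons ev r ih =>
    intro D
    obtain ⟨s, f⟩ := ev
    by_cases hc : D.contains s = true
    · have hsk : s ∈ D.keys := by
        rw [PySem.Dict.contains_eq_decide_mem_keys] at hc
        simpa using hc
      simp only [List.foldl_cons, hc, if_true, List.map_cons]
      rw [ih, pvFO, if_pos hsk]
    · have hc' : D.contains s = false := by simpa using hc
      have hsk : s ∉ D.keys := by
        rw [PySem.Dict.contains_eq_decide_mem_keys] at hc'
        simpa using hc'
      simp only [List.foldl_cons, hc', Bool.false_eq_true, if_false, List.map_cons]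
      rw [ih, PySem.Dict.items_insert_of_not_contains (h := hc'),
        PySem.Dict.keys_insert_of_not_contains (h := hc'), pvFO, if_neg hsk,
        pvFO_congr (r.map Prod.fst) (D.keys ++ [s]) (s :: D.keys) (by intro x; simp [or_comm]),
        List.map_cons, List.append_assoc, List.singleton_append]

-- ===== VERDICT (by name: the statement is the Claim_ definition above) =====
theorem slothosts_to_eviction_counts_spec : Claim_equal_slothosts_to_eviction_counts := by
  intro bpd _ _
  unfold Spec_slothosts_to_eviction_counts
  unfold slothosts_to_eviction_counts_alt
  rw [pv_A_events, pv_B_events]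
  rw [pv_A_inv (pvEvents bpd) [] PySem.Dict.empty (by rfl)]
  rw [pv_B_inv (fun k => [((pvEvents bpd).count (k, false) : Int), ((pvEvents bpd).count (k, true) : Int)])
    (pvEvents bpd) PySem.Dict.empty]
  simp only [List.nil_append, pvSpec, pvCF, pvCT]
  rfl
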